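-- pv_equiv track=rewrite | github.com/Skyoxima/Cryptography_and_Hashing | Electronic_Code_Book.py | ascii_list_binarizer
-- ===== SOURCE A (Python) =====
-- def dec_to_binary(dec_num):
--   def mechanism(num):
--     if num >= 1:
--       mechanism(num // 2)
--       bin_list.append(num % 2)
--   bin_list = []
--   mechanism(dec_num)
--   return bin_list
--
-- def ascii_list_binarizer(ascii_list):
--   binary_list = []
--   for num in ascii_list:
--     pad_to_8 = dec_to_binary(num)           # dec to bin only returns significant bits, have to pad for uniform 8 bit representation, 8 bits can represent till 255(included) and that's okay for 1 left shift of any english keyboard char ~(126) x 2 = 252 < 255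
--     while(len(pad_to_8) != 8):
--       pad_to_8.insert(0, 0)
--     binary_list.extend(pad_to_8)
--   return binary_list
-- ===== SOURCE B (Python) =====
-- def ascii_list_binarizer(ascii_list):
--     binary_list = []
--     for num in ascii_list:
--         bits = []
--         n = num
--         while n >= 1:
--             bits.append(n % 2)
--             n //= 2
--         bits.reverse()
--         binary_list.extend([0] * (8 - len(bits)) + bits)
--     return binary_list
-- ===== Notes on version B (the rewrite author's own statement) =====
-- stated objective: simpler
-- what changed: Replaces the recursive MSB-first bit builder and the insert(0,0) padding while-loop with a single iterative LSB-collect-then-reverse loop and arithmetic front padding via [0]*(8-len(bits)); Pre_ excludes elements > 255, on which A's padding while-loop never terminates.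
import Mathlib
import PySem

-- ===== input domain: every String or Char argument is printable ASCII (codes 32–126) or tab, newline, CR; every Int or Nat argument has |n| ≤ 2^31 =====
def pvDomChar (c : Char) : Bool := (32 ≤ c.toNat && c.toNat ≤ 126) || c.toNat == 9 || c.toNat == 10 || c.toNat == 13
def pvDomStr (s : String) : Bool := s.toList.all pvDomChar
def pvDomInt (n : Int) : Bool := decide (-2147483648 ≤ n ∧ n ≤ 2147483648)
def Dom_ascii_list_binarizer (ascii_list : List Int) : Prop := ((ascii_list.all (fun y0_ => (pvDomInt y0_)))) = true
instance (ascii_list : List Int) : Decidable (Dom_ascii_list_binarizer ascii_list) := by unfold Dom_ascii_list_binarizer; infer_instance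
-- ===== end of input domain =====

-- B replaces A's recursive MSB-first bit builder and insert(0,0) padding while-loop with one
-- iterative LSB-collect-then-reverse loop and arithmetic front padding (objective: simpler).

-- ===== PORT A =====
-- dec_to_binary's inner recursive `mechanism`: appends of the recursive call happen first,
-- so the result is (recursive result) ++ [num % 2].
def pvMechanism (num : Int) : List Int :=
  if _h : num ≥ 1 then
    pvMechanism (PySem.Int.floordiv num 2) ++ [PySem.Int.mod num 2]
  else []
termination_by num.toNat
decreasing_by
  have : PySem.Int.floordiv num 2 = num / 2 := PySem.Int.floordiv_eq_ediv_of_pos (by omega)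
  rw [this]; omega

def dec_to_binary (dec_num : Int) : List Int := pvMechanism dec_num

-- Python's while condition is `len != 8`; when len > 8 Python loops forever (excluded by Pre_),
-- so the guard here is `len < 8` to make the same loop total.
def pvPadTo8 (l : List Int) : List Int :=
  if l.length < 8 then pvPadTo8 (0 :: l) else l
termination_by 8 - l.length

def ascii_list_binarizer (ascii_list : List Int) : List Int :=
  ascii_list.foldl (fun binary_list num => binary_list ++ pvPadTo8 (dec_to_binary num)) []

-- ===== PORT B =====
-- iterative LSB-first collection: while n >= 1: bits.append(n % 2); n //= 2
def pvBitsLSB (n : Int) : List Int :=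
  if _h : n ≥ 1 then
    PySem.Int.mod n 2 :: pvBitsLSB (PySem.Int.floordiv n 2)
  else []
termination_by n.toNat
decreasing_by
  have : PySem.Int.floordiv n 2 = n / 2 := PySem.Int.floordiv_eq_ediv_of_pos (by omega)
  rw [this]; omega

def ascii_list_binarizer_alt (ascii_list : List Int) : List Int :=
  ascii_list.foldl
    (fun binary_list num =>
      let bits := (pvBitsLSB num).reverse
      binary_list ++ (List.replicate (8 - bits.length) 0 ++ bits)) []

-- ===== PRECONDITION & SPEC =====
-- Pre_ excludes lists containing an element > 255: on those A's padding while-loop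
-- (`while len(pad_to_8) != 8`) never terminates, so A never returns.
def Pre_ascii_list_binarizer (ascii_list : List Int) : Prop :=
  ∀ x ∈ ascii_list, x ≤ 255
instance (ascii_list : List Int) : Decidable (Pre_ascii_list_binarizer ascii_list) := by
  unfold Pre_ascii_list_binarizer; infer_instance
def pvWitness_ascii_list_binarizer : List Int := [72, 105, 255, 0, -3]

def Spec_ascii_list_binarizer (ascii_list : List Int) (out : List Int) : Prop :=
  out = ascii_list_binarizer_alt ascii_list
instance (ascii_list : List Int) (out : List Int) : Decidable (Spec_ascii_list_binarizer ascii_list out) := by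
  unfold Spec_ascii_list_binarizer; infer_instance

-- ===== CLAIM (what is proved, stated in full; the proofs are below) =====
def Claim_equal_ascii_list_binarizer : Prop :=
  ∀ (ascii_list : List Int), Dom_ascii_list_binarizer ascii_list →
    Pre_ascii_list_binarizer ascii_list →
    Spec_ascii_list_binarizer ascii_list (ascii_list_binarizer ascii_list)

-- ===== LEMMAS AND PROOFS =====

-- A's recursion builds exactly the reverse of B's LSB-first list.
theorem pvMechanism_eq_reverse (n : Int) : pvMechanism n = (pvBitsLSB n).reverse := by
  by_cases h : n ≥ 1
  · rw [pvMechanism, pvBitsLSB]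
    simp only [h, dif_pos, List.reverse_cons]
    rw [pvMechanism_eq_reverse (PySem.Int.floordiv n 2)]
  · rw [pvMechanism, pvBitsLSB]; simp [h]
termination_by n.toNat
decreasing_by
  have : PySem.Int.floordiv n 2 = n / 2 := PySem.Int.floordiv_eq_ediv_of_pos (by omega)
  rw [this]; omega

-- bit-length bound: n < 2^k → at most k bits
theorem pvBitsLSB_length_le (k : Nat) (n : Int) (h : n < 2 ^ k) :
    (pvBitsLSB n).length ≤ k := by
  induction k generalizing n with
  | zero =>
    rw [pvBitsLSB]
    have : ¬ n ≥ 1 := by simpa using h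
    simp [this]
  | succ k ih =>
    rw [pvBitsLSB]
    by_cases h1 : n ≥ 1
    · simp only [h1, dif_pos, List.length_cons]
      have hf : PySem.Int.floordiv n 2 = n / 2 := PySem.Int.floordiv_eq_ediv_of_pos (by omega)
      have h2 : (2 : Int) ^ (k + 1) = 2 ^ k * 2 := by ring
      have : n / 2 < 2 ^ k := by omega
      have := ih (PySem.Int.floordiv n 2) (by rw [hf]; exact this)
      omega
    · simp [h1]

theorem pvPadTo8_eq (l : List Int) (h : l.length ≤ 8) :
    pvPadTo8 l = List.replicate (8 - l.length) 0 ++ l := by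
  rw [pvPadTo8]
  by_cases hl : l.length < 8
  · simp only [hl, if_pos]
    rw [pvPadTo8_eq (0 :: l) (by simp; omega)]
    have : 8 - l.length = (8 - (0 :: l).length) + 1 := by simp; omega
    rw [this, List.replicate_succ']
    simp
  · have : l.length = 8 := by omega
    simp [this]
termination_by 8 - l.length
decreasing_by simp; omega

-- ===== VERDICT (by name: the statement is the Claim_ definition above) =====
theorem ascii_list_binarizer_spec : Claim_equal_ascii_list_binarizer := by
  intro ascii_list _ hpre
  unfold Spec_ascii_list_binarizer ascii_list_binarizer ascii_list_binarizer_alt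
  apply PySem.List.foldl_congr_mem
  intro acc x hx
  have hle : x ≤ 255 := hpre x hx
  have hlen : (pvBitsLSB x).length ≤ 8 := pvBitsLSB_length_le 8 x (by norm_num; omega)
  rw [dec_to_binary, pvMechanism_eq_reverse, pvPadTo8_eq _ (by simpa using hlen)]
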